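-- pv_equiv track=rewrite | github.com/DianaWijaya/data-structures-and-algorithms | projects/dl-distance-z-algorithm/naive_dl_algorithm.py | validated_dl_matches
-- ===== SOURCE A (Python) =====
-- def true_dl_distance_le1_match(s1, s2):
--     """
--     Returns True if the Damerau-Levenshtein distance between s1 and s2 is ≤ 1.
--     Supports substitution, insertion, deletion, and transposition.
--     """
--     len1, len2 = len(s1), len(s2)
--     if abs(len1 - len2) > 1:
--         return False
--
--     # Exact match
--     if s1 == s2:
--         return True
--
--     # Substitution
--     if len1 == len2:
--         diff = sum(a != b for a, b in zip(s1, s2))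
--         if diff == 1:
--             return True
--         # Transposition
--         for i in range(len1 - 1):
--             if (s1[i] != s2[i] or s1[i+1] != s2[i+1]) and \
--                s1[i] == s2[i+1] and s1[i+1] == s2[i] and s1[:i] == s2[:i] and s1[i+2:] == s2[i+2:]:
--                 return True
--         return False
--
--     # Insertion or Deletion
--     if len1 + 1 == len2:
--         # s1 is missing one char
--         for i in range(len2):
--             if s1 == s2[:i] + s2[i+1:]:
--                 return True
--     elif len1 == len2 + 1:
--         # s2 is missing one char
--         for i in range(len1):
--             if s2 == s1[:i] + s1[i+1:]:
--                 return True
--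
--     return False
--
-- def validated_dl_matches(text, pattern):
--     m = len(pattern)
--     n = len(text)
--     matches = []
--
--     for i in range(n):
--         for window_size in [m - 1, m, m + 1]:
--             if i + window_size > n or window_size < m - 1:
--                 continue
--             candidate = text[i:i + window_size]
--             if true_dl_distance_le1_match(candidate, pattern):
--                 matches.append(i + 1)
--                 break
--
--     return sorted(set(matches))
-- ===== SOURCE B (Python) =====
-- def _within1(s, t):
--     # strip the longest common prefix, then decide in O(1)
--     k = 0
--     while k < len(s) and k < len(t) and s[k] == t[k]:
--         k += 1
--     s, t = s[k:], t[k:]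
--     if not s and not t:
--         return True
--     if len(s) == len(t):
--         return s[1:] == t[1:] or (len(s) >= 2 and s[0] == t[1] and s[1] == t[0] and s[2:] == t[2:])
--     if len(s) + 1 == len(t):
--         return s == t[1:]
--     if len(t) + 1 == len(s):
--         return t == s[1:]
--     return False
--
-- def validated_dl_matches(text, pattern):
--     m = len(pattern)
--     n = len(text)
--     out = []
--     for i in range(n):
--         for w in (m - 1, m, m + 1):
--             if i + w <= n and _within1(text[i:i + w], pattern):
--                 out.append(i + 1)
--                 break
--     return out
-- ===== Notes on version B (the rewrite author's own statement) =====
-- stated objective: faster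
-- what changed: A's DL-distance-1 window test (mismatch-count sum, a transposition scan and per-position deletion rebuilds, each re-slicing the window) is replaced by one strip-the-common-prefix pass followed by O(1) suffix checks, and A's final sorted(set(..)) pass is dropped since match positions are produced strictly increasing.
import Mathlib
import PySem

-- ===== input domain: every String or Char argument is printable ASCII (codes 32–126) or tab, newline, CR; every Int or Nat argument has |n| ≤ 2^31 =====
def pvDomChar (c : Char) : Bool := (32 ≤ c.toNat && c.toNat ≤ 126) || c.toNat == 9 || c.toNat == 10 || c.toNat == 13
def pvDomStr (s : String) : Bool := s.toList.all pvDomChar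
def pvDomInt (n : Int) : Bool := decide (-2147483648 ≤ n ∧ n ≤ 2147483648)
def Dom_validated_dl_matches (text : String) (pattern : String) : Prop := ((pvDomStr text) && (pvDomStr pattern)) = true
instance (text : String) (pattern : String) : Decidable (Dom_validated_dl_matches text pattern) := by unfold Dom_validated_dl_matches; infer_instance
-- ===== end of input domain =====

-- B replaces A's per-case rescans of the two windows (mismatch count, transposition scan,
-- per-position deletion scan) by one strip-the-common-prefix pass followed by O(1) checks,
-- and drops A's final sorted(set(..)) pass (the match positions are produced strictly increasing).
-- Objective: faster (O(m) instead of O(m^2) work per window; measured faster in a timing run).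

-- ===== PORT A =====
-- Python indexing s1[i] inside the loops is always in range, so comparing the
-- Option values of PySem.List.pyGet? equals comparing the Python characters.
def dlA (s1 s2 : List Char) : Bool :=
  let len1 : Int := s1.length
  let len2 : Int := s2.length
  if 1 < (len1 - len2).natAbs then false
  else if s1 == s2 then true
  else if len1 = len2 then
    let diff : Int := ((s1.zip s2).map (fun ab => if ab.1 ≠ ab.2 then (1 : Int) else 0)).sum
    if diff = 1 then true
    else
      (PySem.List.pyRange 0 (len1 - 1) 1).any (fun i =>
        ((PySem.List.pyGet? s1 i != PySem.List.pyGet? s2 i) ||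
         (PySem.List.pyGet? s1 (i + 1) != PySem.List.pyGet? s2 (i + 1))) &&
        (PySem.List.pyGet? s1 i == PySem.List.pyGet? s2 (i + 1)) &&
        (PySem.List.pyGet? s1 (i + 1) == PySem.List.pyGet? s2 i) &&
        (PySem.List.slice s1 none (some i) == PySem.List.slice s2 none (some i)) &&
        (PySem.List.slice s1 (some (i + 2)) none == PySem.List.slice s2 (some (i + 2)) none))
  else if len1 + 1 = len2 then
    (PySem.List.pyRange 0 len2 1).any (fun i =>
      s1 == PySem.List.slice s2 none (some i) ++ PySem.List.slice s2 (some (i + 1)) none)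
  else if len1 = len2 + 1 then
    (PySem.List.pyRange 0 len1 1).any (fun i =>
      s2 == PySem.List.slice s1 none (some i) ++ PySem.List.slice s1 (some (i + 1)) none)
  else false

-- the inner 'for window_size in [m-1, m, m+1]: … break' loop of A
def aLoop (t p : List Char) (n m i : Int) : List Int → List Int → List Int
  | [], acc => acc
  | ws :: rest, acc =>
    if i + ws > n ∨ ws < m - 1 then aLoop t p n m i rest acc
    else if dlA (PySem.List.slice t (some i) (some (i + ws))) p then acc ++ [i + 1]
    else aLoop t p n m i rest acc

def validated_dl_matches (text : String) (pattern : String) : List Int :=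
  let t := text.toList
  let p := pattern.toList
  let m : Int := p.length
  let n : Int := t.length
  let ms := (PySem.List.pyRange 0 n 1).foldl (fun acc i => aLoop t p n m i [m - 1, m, m + 1] acc) []
  PySem.List.sorted (PySem.Set.ofList ms) (fun x => x) false

-- ===== PORT B =====
-- the 'while k < … and s[k] == t[k]: k += 1' loop of Source B followed by s[k:], t[k:]
def stripCP : List Char → List Char → List Char × List Char
  | a :: s, b :: t => if a = b then stripCP s t else (a :: s, b :: t)
  | s, t => (s, t)

def within1Alt (s0 t0 : List Char) : Bool :=
  let st := stripCP s0 t0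
  let s := st.1
  let t := st.2
  if s.isEmpty && t.isEmpty then true
  else if s.length = t.length then
    (s.drop 1 == t.drop 1) ||
    (decide (2 ≤ s.length) && (PySem.List.pyGet? s 0 == PySem.List.pyGet? t 1) &&
     (PySem.List.pyGet? s 1 == PySem.List.pyGet? t 0) && (s.drop 2 == t.drop 2))
  else if s.length + 1 = t.length then s == t.drop 1
  else if t.length + 1 = s.length then t == s.drop 1
  else false

-- the inner 'for w in (m-1, m, m+1): … break' loop of Source B
def bLoop (t p : List Char) (n m i : Int) : List Int → List Int → List Int
  | [], acc => acc
  | w :: rest, acc =>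
    if i + w ≤ n ∧ within1Alt (PySem.List.slice t (some i) (some (i + w))) p then acc ++ [i + 1]
    else bLoop t p n m i rest acc

def validated_dl_matches_alt (text : String) (pattern : String) : List Int :=
  let t := text.toList
  let p := pattern.toList
  let m : Int := p.length
  let n : Int := t.length
  (PySem.List.pyRange 0 n 1).foldl (fun acc i => bLoop t p n m i [m - 1, m, m + 1] acc) []

-- ===== PRECONDITION & SPEC =====
def Spec_validated_dl_matches (text : String) (pattern : String) (out : List Int) : Prop := out = validated_dl_matches_alt text pattern
instance (text : String) (pattern : String) (out : List Int) : Decidable (Spec_validated_dl_matches text pattern out) := by unfold Spec_validated_dl_matches; infer_instance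

-- ===== CLAIM (what is proved, stated in full; the proofs are below) =====
def Claim_equal_validated_dl_matches : Prop := ∀ (text : String) (pattern : String), Dom_validated_dl_matches text pattern → Spec_validated_dl_matches text pattern (validated_dl_matches text pattern)

-- ===== LEMMAS AND PROOFS =====

theorem pvAnyRange (n : Nat) (F : Int → Bool) :
    (PySem.List.pyRange 0 (n : Int) 1).any F = (List.range n).any (fun k => F k) := by
  rw [PySem.List.pyRange_one]
  simp
  rfl

theorem pvAnyPeel (n : Nat) (f : Nat → Bool) :
    (List.range (n + 1)).any f = (f 0 || (List.range n).any (fun j => f (j + 1))) := by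
  rw [List.range_succ_eq_map]
  simp
  rfl

theorem pvDiffSum_nonneg (s t : List Char) :
    0 ≤ ((s.zip t).map (fun ab => if ab.1 = ab.2 then (0 : Int) else 1)).sum := by
  induction s generalizing t with
  | nil => simp
  | cons a s ih =>
    cases t with
    | nil => simp
    | cons b t =>
      simp only [List.zip_cons_cons, List.map_cons, List.sum_cons]
      have := ih t
      split <;> omega

theorem pvDiffSum_eq_zero_iff (s t : List Char) (h : s.length = t.length) :
    (((s.zip t).map (fun ab => if ab.1 = ab.2 then (0 : Int) else 1)).sum = 0 ↔ s = t) := by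
  induction s generalizing t with
  | nil => cases t <;> simp_all
  | cons a s ih =>
    cases t with
    | nil => simp at h
    | cons b t =>
      have hnn := pvDiffSum_nonneg s t
      have hih := ih t (by simpa using h)
      simp only [List.zip_cons_cons, List.map_cons, List.sum_cons, List.cons.injEq]
      rcases eq_or_ne a b with rfl | hab
      · rw [if_pos rfl, zero_add, hih]
        simp
      · rw [if_neg hab]
        constructor
        · intro h0; omega
        · rintro ⟨rfl, -⟩; exact absurd rfl hab

theorem pvDlA_cons_cons (a : Char) (s t : List Char) :
    dlA (a :: s) (a :: t) = dlA s t := by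
  unfold dlA
  simp only [List.length_cons, ne_eq, ite_not]
  by_cases hfar : 1 < (((s.length:Int)) - ((t.length:Int))).natAbs
  · rw [if_pos (show 1 < (((s.length+1:Nat):Int) - ((t.length+1:Nat):Int)).natAbs from by omega),
        if_pos (show 1 < (((s.length:Nat):Int) - ((t.length:Nat):Int)).natAbs from hfar)]
  · rw [if_neg (show ¬ 1 < (((s.length+1:Nat):Int) - ((t.length+1:Nat):Int)).natAbs from by omega),
        if_neg (show ¬ 1 < (((s.length:Nat):Int) - ((t.length:Nat):Int)).natAbs from hfar)]
    by_cases hst : s = t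
    · rw [if_pos (show ((a::s : List Char) == a::t) = true from by simp [hst]),
          if_pos (show ((s : List Char) == t) = true from by simp [hst])]
    · rw [if_neg (show ¬ ((a::s : List Char) == a::t) = true from by simp [hst]),
          if_neg (show ¬ ((s : List Char) == t) = true from by simp [hst])]
      by_cases hlen : s.length = t.length
      · rw [if_pos (show (((s.length+1:Nat):Int)) = ((t.length+1:Nat):Int) from by omega),
            if_pos (show (((s.length:Nat):Int)) = ((t.length:Nat):Int) from by omega)]
        simp only [List.zip_cons_cons, List.map_cons, List.sum_cons,
          if_true, zero_add]
        by_cases hdiff : ((s.zip t).map (fun ab => if ab.1 = ab.2 then (0:Int) else 1)).sum = 1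
        · rw [if_pos hdiff, if_pos hdiff]
        · rw [if_neg hdiff, if_neg hdiff]
          rw [show ((↑(s.length+1):Int) - 1) = ((s.length:Nat):Int) from by push_cast; omega,
            pvAnyRange s.length]
          cases s with
          | nil =>
            cases t with
            | nil => exact absurd rfl hst
            | cons d t2 => simp at hlen
          | cons c s2 =>
            cases t with
            | nil => simp at hlen
            | cons d t2 =>
              rw [show ((↑((c::s2).length):Int) - 1) = ((s2.length:Nat):Int) from by
                simp only [List.length_cons]; push_cast; omega, pvAnyRange s2.length]
              simp only [List.length_cons]
              rw [pvAnyPeel]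
              have hterm : ∀ j : Nat,
                  (((PySem.List.pyGet? (a::c::s2) (((j:Nat)+1:Nat)) != PySem.List.pyGet? (a::d::t2) (((j:Nat)+1:Nat))) ||
                    (PySem.List.pyGet? (a::c::s2) ((((j:Nat)+1:Nat):Int) + 1) != PySem.List.pyGet? (a::d::t2) ((((j:Nat)+1:Nat):Int) + 1))) &&
                   (PySem.List.pyGet? (a::c::s2) (((j:Nat)+1:Nat)) == PySem.List.pyGet? (a::d::t2) ((((j:Nat)+1:Nat):Int) + 1)) &&
                   (PySem.List.pyGet? (a::c::s2) ((((j:Nat)+1:Nat):Int) + 1) == PySem.List.pyGet? (a::d::t2) (((j:Nat)+1:Nat))) &&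
                   (PySem.List.slice (a::c::s2) none (some (((j:Nat)+1:Nat))) == PySem.List.slice (a::d::t2) none (some (((j:Nat)+1:Nat)))) &&
                   (PySem.List.slice (a::c::s2) (some ((((j:Nat)+1:Nat):Int) + 2)) none == PySem.List.slice (a::d::t2) (some ((((j:Nat)+1:Nat):Int) + 2)) none)) =
                  (((PySem.List.pyGet? (c::s2) ((j:Nat)) != PySem.List.pyGet? (d::t2) ((j:Nat))) ||
                    (PySem.List.pyGet? (c::s2) (((j:Nat):Int) + 1) != PySem.List.pyGet? (d::t2) (((j:Nat):Int) + 1))) &&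
                   (PySem.List.pyGet? (c::s2) ((j:Nat)) == PySem.List.pyGet? (d::t2) (((j:Nat):Int) + 1)) &&
                   (PySem.List.pyGet? (c::s2) (((j:Nat):Int) + 1) == PySem.List.pyGet? (d::t2) ((j:Nat))) &&
                   (PySem.List.slice (c::s2) none (some ((j:Nat))) == PySem.List.slice (d::t2) none (some ((j:Nat)))) &&
                   (PySem.List.slice (c::s2) (some (((j:Nat):Int) + 2)) none == PySem.List.slice (d::t2) (some (((j:Nat):Int) + 2)) none)) := by
                intro j
                have hc1 : ((((j:Nat)+1:Nat):Int) + 1) = (((j+2:Nat):Int)) := by push_cast; omega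
                have hc2 : (((j:Nat):Int) + 1) = (((j+1:Nat):Int)) := by push_cast; omega
                have hc3 : ((((j:Nat)+1:Nat):Int) + 2) = (((j+3:Nat):Int)) := by push_cast; omega
                have hc4 : (((j:Nat):Int) + 2) = (((j+2:Nat):Int)) := by push_cast; omega
                rw [hc1, hc2, hc3, hc4]
                simp only [PySem.List.pyGet?_natCast, PySem.List.slice_to_natCast,
                  PySem.List.slice_from_natCast, List.take_succ_cons, List.drop_succ_cons,
                  List.getElem?_cons_succ]
                simp
              simp only [hterm]
              have hF0 : (((PySem.List.pyGet? (a::c::s2) (((0:Nat)):Int) != PySem.List.pyGet? (a::d::t2) (((0:Nat)):Int)) ||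
                    (PySem.List.pyGet? (a::c::s2) ((((0:Nat)):Int) + 1) != PySem.List.pyGet? (a::d::t2) ((((0:Nat)):Int) + 1))) &&
                   (PySem.List.pyGet? (a::c::s2) (((0:Nat)):Int) == PySem.List.pyGet? (a::d::t2) ((((0:Nat)):Int) + 1)) &&
                   (PySem.List.pyGet? (a::c::s2) ((((0:Nat)):Int) + 1) == PySem.List.pyGet? (a::d::t2) (((0:Nat)):Int)) &&
                   (PySem.List.slice (a::c::s2) none (some (((0:Nat)):Int)) == PySem.List.slice (a::d::t2) none (some (((0:Nat)):Int))) &&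
                   (PySem.List.slice (a::c::s2) (some ((((0:Nat)):Int) + 2)) none == PySem.List.slice (a::d::t2) (some ((((0:Nat)):Int) + 2)) none)) = false := by
                simp [PySem.List.pyGet?, PySem.List.pyIdx?, PySem.List.slice, PySem.List.clampIdx,
                  show ((0:Int) ≤ ↑s2.length + 1) from by positivity,
                  show ((0:Int) ≤ ↑t2.length + 1) from by positivity]
                intro h1 h2 h3
                exact absurd (h3.trans h2) h1
              rw [hF0]
              simp
      · rw [if_neg (show ¬ (((s.length+1:Nat):Int)) = ((t.length+1:Nat):Int) from by omega),
            if_neg (show ¬ (((s.length:Nat):Int)) = ((t.length:Nat):Int) from by omega)]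
        by_cases hins : s.length + 1 = t.length
        · rw [if_pos (show (((s.length+1:Nat):Int)) + 1 = ((t.length+1:Nat):Int) from by omega),
              if_pos (show (((s.length:Nat):Int)) + 1 = ((t.length:Nat):Int) from by omega)]
          rw [pvAnyRange (t.length + 1), pvAnyRange t.length, pvAnyPeel]
          have hterm : ∀ j : Nat,
              ((a :: s : List Char) == PySem.List.slice (a :: t) none (some ((j:Nat)+1:Nat)) ++
                PySem.List.slice (a :: t) (some ((((j:Nat)+1:Nat):Int) + 1)) none) =
              ((s : List Char) == PySem.List.slice t none (some ((j:Nat):Int)) ++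
                PySem.List.slice t (some (((j:Nat):Int) + 1)) none) := by
            intro j
            have hc1 : ((((j:Nat)+1:Nat):Int) + 1) = (((j+2:Nat):Int)) := by push_cast; omega
            have hc2 : (((j:Nat):Int) + 1) = (((j+1:Nat):Int)) := by push_cast; omega
            rw [hc1, hc2]
            simp only [PySem.List.slice_to_natCast, PySem.List.slice_from_natCast,
              List.take_succ_cons, List.cons_append, List.drop_succ_cons]
            simp
          simp only [hterm]
          rw [show ((a :: s : List Char) == PySem.List.slice (a :: t) none (some ((0:Nat):Int)) ++
                PySem.List.slice (a :: t) (some (((0:Nat):Int) + 1)) none) = ((a :: s : List Char) == t) from by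
            simp [PySem.List.slice, PySem.List.clampIdx]]
          by_cases hG : (a :: s : List Char) = t
          · have hsmall : ((List.range t.length).any fun k =>
                (s : List Char) == PySem.List.slice t none (some ((k:Nat):Int)) ++
                  PySem.List.slice t (some (((k:Nat):Int) + 1)) none) = true := by
              refine List.any_eq_true.mpr ⟨0, List.mem_range.mpr (by omega), ?_⟩
              simp [PySem.List.slice, PySem.List.clampIdx, ← hG]
            rw [hsmall]
            simp [hG]
          · simp [hG]
        · rw [if_neg (show ¬ (((s.length+1:Nat):Int)) + 1 = ((t.length+1:Nat):Int) from by omega),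
              if_neg (show ¬ (((s.length:Nat):Int)) + 1 = ((t.length:Nat):Int) from by omega)]
          rw [if_pos (show (((s.length+1:Nat):Int)) = ((t.length+1:Nat):Int) + 1 from by omega),
              if_pos (show (((s.length:Nat):Int)) = ((t.length:Nat):Int) + 1 from by omega)]
          rw [pvAnyRange (s.length + 1), pvAnyRange s.length, pvAnyPeel]
          have hterm : ∀ j : Nat,
              ((a :: t : List Char) == PySem.List.slice (a :: s) none (some ((j:Nat)+1:Nat)) ++
                PySem.List.slice (a :: s) (some ((((j:Nat)+1:Nat):Int) + 1)) none) =
              ((t : List Char) == PySem.List.slice s none (some ((j:Nat):Int)) ++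
                PySem.List.slice s (some (((j:Nat):Int) + 1)) none) := by
            intro j
            have hc1 : ((((j:Nat)+1:Nat):Int) + 1) = (((j+2:Nat):Int)) := by push_cast; omega
            have hc2 : (((j:Nat):Int) + 1) = (((j+1:Nat):Int)) := by push_cast; omega
            rw [hc1, hc2]
            simp only [PySem.List.slice_to_natCast, PySem.List.slice_from_natCast,
              List.take_succ_cons, List.cons_append, List.drop_succ_cons]
            simp
          simp only [hterm]
          rw [show ((a :: t : List Char) == PySem.List.slice (a :: s) none (some ((0:Nat):Int)) ++
                PySem.List.slice (a :: s) (some (((0:Nat):Int) + 1)) none) = ((a :: t : List Char) == s) from by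
            simp [PySem.List.slice, PySem.List.clampIdx]]
          by_cases hG : (a :: t : List Char) = s
          · have hsmall : ((List.range s.length).any fun k =>
                (t : List Char) == PySem.List.slice s none (some ((k:Nat):Int)) ++
                  PySem.List.slice s (some (((k:Nat):Int) + 1)) none) = true := by
              refine List.any_eq_true.mpr ⟨0, List.mem_range.mpr (by omega), ?_⟩
              simp [PySem.List.slice, PySem.List.clampIdx, ← hG]
            rw [hsmall]
            simp [hG]
          · simp [hG]

theorem pvBase_nil_left (t : List Char) : dlA [] t = within1Alt [] t := by
  cases t with
  | nil => decide
  | cons b t' =>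
    cases t' with
    | nil =>
      simp [dlA, within1Alt, stripCP, PySem.List.slice]
      exact ⟨0, by decide⟩
    | cons c t'' =>
      simp [dlA, within1Alt, stripCP]
      omega

theorem pvBase_nil_right (a : Char) (s : List Char) : dlA (a :: s) [] = within1Alt (a :: s) [] := by
  cases s with
  | nil =>
    simp [dlA, within1Alt, stripCP, PySem.List.slice]
    exact ⟨0, by decide⟩
  | cons c s' =>
    simp [dlA, within1Alt, stripCP]
    omega

theorem pvBase_ne_eqlen (a b : Char) (s t : List Char) (hab : a ≠ b) (hlen : s.length = t.length) :
    dlA (a :: s) (b :: t) = within1Alt (a :: s) (b :: t) := by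
  unfold dlA within1Alt
  rw [show stripCP (a :: s) (b :: t) = (a :: s, b :: t) from by simp [stripCP, hab]]
  simp only [List.length_cons, List.isEmpty_cons, Bool.and_self, ne_eq, ite_not]
  rw [if_neg (by simp; omega)]
  rw [if_neg (by simp [hab])]
  rw [if_pos (by push_cast; omega)]
  simp only [List.zip_cons_cons, List.map_cons, List.sum_cons]
  simp only [if_neg hab]
  by_cases hst : s = t
  · subst hst
    rw [if_pos (by rw [pvDiffSum_eq_zero_iff s s rfl |>.mpr rfl]; norm_num)]
    simp
  · rw [if_neg (by have h1 := pvDiffSum_nonneg s t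
                   have h2 := pvDiffSum_eq_zero_iff s t hlen
                   intro hc; apply hst; apply h2.mp; omega)]
    have hs1 : (↑(s.length + 1) - 1 : Int) = (↑s.length : Int) := by push_cast; omega
    rw [hs1, pvAnyRange]
    cases s with
    | nil =>
      cases t with
      | nil => exact absurd rfl hst
      | cons d t2 => simp at hlen
    | cons c s2 =>
      cases t with
      | nil => simp at hlen
      | cons d t2 =>
        simp only [List.length_cons]
        rw [pvAnyPeel]
        have htail : (List.range s2.length).any (fun j =>
            ((PySem.List.pyGet? (a :: c :: s2) ((j:Nat)+1:Nat) != PySem.List.pyGet? (b :: d :: t2) ((j:Nat)+1:Nat)) ||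
             (PySem.List.pyGet? (a :: c :: s2) (((j:Nat)+1:Nat)+1) != PySem.List.pyGet? (b :: d :: t2) (((j:Nat)+1:Nat)+1))) &&
            (PySem.List.pyGet? (a :: c :: s2) ((j:Nat)+1:Nat) == PySem.List.pyGet? (b :: d :: t2) (((j:Nat)+1:Nat)+1)) &&
            (PySem.List.pyGet? (a :: c :: s2) (((j:Nat)+1:Nat)+1) == PySem.List.pyGet? (b :: d :: t2) ((j:Nat)+1:Nat)) &&
            (PySem.List.slice (a :: c :: s2) none (some ((j:Nat)+1:Nat)) == PySem.List.slice (b :: d :: t2) none (some ((j:Nat)+1:Nat))) &&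
            (PySem.List.slice (a :: c :: s2) (some (((j:Nat)+1:Nat)+2)) none == PySem.List.slice (b :: d :: t2) (some (((j:Nat)+1:Nat)+2)) none)) = false := by
          refine List.any_eq_false.mpr (fun j hj => ?_)
          simp only [PySem.List.slice_to_natCast, List.take_succ_cons]
          simp [hab]
        rw [htail]
        have hl2 : s2.length = t2.length := by simpa using hlen
        simp [PySem.List.pyGet?, PySem.List.pyIdx?, PySem.List.slice, PySem.List.clampIdx, hl2,
          show ((0:Int) ≤ ↑t2.length + 1) from by positivity]
        rw [← hl2, List.take_length]
        have h1 : (some a != some b) = true := by simp [hab]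
        simp only [h1, Bool.true_or]
        by_cases hcd : c = d
        · by_cases hs2 : s2 = t2
          · exact absurd (by rw [hcd, hs2]) hst
          · simp [hs2]
        · simp [hcd]

theorem pvBase_ne_ins (a b : Char) (s t : List Char) (hab : a ≠ b) (hlen : s.length + 1 = t.length) :
    dlA (a :: s) (b :: t) = within1Alt (a :: s) (b :: t) := by
  unfold dlA within1Alt
  rw [show stripCP (a :: s) (b :: t) = (a :: s, b :: t) from by simp [stripCP, hab]]
  simp only [List.length_cons, List.isEmpty_cons, Bool.and_self, ne_eq, ite_not]
  rw [if_neg (by simp; omega)]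
  rw [if_neg (by simp [hab])]
  rw [if_neg (by push_cast; omega)]
  rw [if_pos (by push_cast; omega)]
  rw [pvAnyRange (t.length + 1), pvAnyPeel]
  have htail : ((List.range t.length).any fun j =>
      (a :: s : List Char) == PySem.List.slice (b :: t) none (some ((j:Nat)+1:Nat)) ++
        PySem.List.slice (b :: t) (some (((j:Nat)+1:Nat) + 1)) none) = false := by
    refine List.any_eq_false.mpr (fun j hj => ?_)
    have hc : ((((j:Nat)+1:Nat) : Int) + 1) = (((j+2 : Nat) : Int)) := by push_cast; omega
    simp only [hc, PySem.List.slice_to_natCast, PySem.List.slice_from_natCast,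
      List.take_succ_cons, List.cons_append]
    simp [hab]
  rw [htail]
  simp [PySem.List.slice, PySem.List.clampIdx, hlen]

theorem pvBase_ne_del (a b : Char) (s t : List Char) (hab : a ≠ b) (hlen : t.length + 1 = s.length) :
    dlA (a :: s) (b :: t) = within1Alt (a :: s) (b :: t) := by
  unfold dlA within1Alt
  rw [show stripCP (a :: s) (b :: t) = (a :: s, b :: t) from by simp [stripCP, hab]]
  simp only [List.length_cons, List.isEmpty_cons, Bool.and_self, ne_eq, ite_not]
  rw [if_neg (by simp; omega)]
  rw [if_neg (by simp [hab])]
  rw [if_neg (by push_cast; omega)]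
  rw [if_neg (by push_cast; omega)]
  rw [if_pos (by push_cast; omega)]
  rw [pvAnyRange (s.length + 1), pvAnyPeel]
  have htail : ((List.range s.length).any fun j =>
      (b :: t : List Char) == PySem.List.slice (a :: s) none (some ((j:Nat)+1:Nat)) ++
        PySem.List.slice (a :: s) (some (((j:Nat)+1:Nat) + 1)) none) = false := by
    refine List.any_eq_false.mpr (fun j hj => ?_)
    have hc : ((((j:Nat)+1:Nat) : Int) + 1) = (((j+2 : Nat) : Int)) := by push_cast; omega
    simp only [hc, PySem.List.slice_to_natCast, PySem.List.slice_from_natCast,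
      List.take_succ_cons, List.cons_append]
    simp [Ne.symm hab]
  rw [htail]
  simp [PySem.List.slice, PySem.List.clampIdx, hlen]
  omega

theorem pvBase_ne_far (a b : Char) (s t : List Char) (hab : a ≠ b)
    (h1 : ¬ s.length = t.length) (h2 : ¬ s.length + 1 = t.length) (h3 : ¬ t.length + 1 = s.length) :
    dlA (a :: s) (b :: t) = within1Alt (a :: s) (b :: t) := by
  unfold dlA within1Alt
  rw [show stripCP (a :: s) (b :: t) = (a :: s, b :: t) from by simp [stripCP, hab]]
  simp only [List.length_cons, List.isEmpty_cons, Bool.and_self, ne_eq, ite_not]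
  rw [if_pos (by simp; omega)]
  rw [if_neg (by decide), if_neg (by omega), if_neg (by omega), if_neg (by omega)]


-- core: A's DL≤1 test equals B's strip-common-prefix test
theorem pvCore (s t : List Char) : dlA s t = within1Alt s t := by
  induction s generalizing t with
  | nil => exact pvBase_nil_left t
  | cons a s ih =>
    cases t with
    | nil => exact pvBase_nil_right a s
    | cons b t =>
      rcases eq_or_ne a b with rfl | hab
      · rw [pvDlA_cons_cons, ih t]
        unfold within1Alt
        rw [show stripCP (a :: s) (a :: t) = stripCP s t from by simp [stripCP]]
      · by_cases h1 : s.length = t.length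
        · exact pvBase_ne_eqlen a b s t hab h1
        · by_cases h2 : s.length + 1 = t.length
          · exact pvBase_ne_ins a b s t hab h2
          · by_cases h3 : t.length + 1 = s.length
            · exact pvBase_ne_del a b s t hab h3
            · exact pvBase_ne_far a b s t hab h1 h2 h3

-- the two inner window loops agree element by element
theorem pvLoop_eq (t p : List Char) (n m i : Int) :
    ∀ (L : List Int) (acc : List Int), (∀ ws ∈ L, ¬ ws < m - 1) →
      aLoop t p n m i L acc = bLoop t p n m i L acc := by
  intro L
  induction L with
  | nil => intro acc h; rfl
  | cons ws rest ih =>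
    intro acc h
    rw [aLoop, bLoop]
    by_cases hskip : i + ws > n
    · rw [if_pos (Or.inl hskip), if_neg (by intro hc; omega),
        ih acc (fun w hw => h w (List.mem_cons_of_mem _ hw))]
    · rw [if_neg (by push Not; exact ⟨by omega, by have := h ws List.mem_cons_self; omega⟩)]
      by_cases hm : dlA (PySem.List.slice t (some i) (some (i + ws))) p = true
      · rw [if_pos hm, if_pos ⟨by omega, by rw [← pvCore]; exact hm⟩]
      · rw [if_neg hm, if_neg (fun hc => hm (by rw [pvCore]; exact hc.2)),
          ih acc (fun w hw => h w (List.mem_cons_of_mem _ hw))]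

-- B's inner loop appends to the accumulator
theorem pvBLoop_shape (t p : List Char) (n m i : Int) (L : List Int) (acc : List Int) :
    bLoop t p n m i L acc = acc ++ bLoop t p n m i L [] := by
  induction L with
  | nil => simp [bLoop]
  | cons w rest ih =>
    rw [bLoop, bLoop]
    split
    · simp
    · rw [ih]

-- B's inner loop from [] returns [] or [i+1]
theorem pvBLoop_cases (t p : List Char) (n m i : Int) (L : List Int) :
    bLoop t p n m i L [] = [] ∨ bLoop t p n m i L [] = [i + 1] := by
  induction L with
  | nil => exact Or.inl rfl
  | cons w rest ih =>
    rw [bLoop]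
    split
    · exact Or.inr (by simp)
    · exact ih

-- a flatMap of per-index singletons over a strictly increasing list is strictly increasing
theorem pvFlat_pairwise (l : List Int) (g : Int → List Int) (hl : l.Pairwise (· < ·))
    (hg : ∀ i, g i = [] ∨ g i = [i + 1]) : (l.flatMap g).Pairwise (· < ·) := by
  induction l with
  | nil => simp
  | cons x xs ih =>
    rw [List.flatMap_cons]
    have hxs := ih (List.Pairwise.sublist (List.sublist_cons_self x xs) hl)
    refine List.pairwise_append.mpr ⟨?_, hxs, ?_⟩
    · rcases hg x with hx | hx <;> simp [hx]
    · intro u hu v hv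
      rcases hg x with hx | hx
      · rw [hx] at hu; simp at hu
      · rw [hx] at hu
        rcases List.mem_flatMap.mp hv with ⟨j, hj, hvj⟩
        rcases hg j with hgj | hgj
        · rw [hgj] at hvj; simp at hvj
        · rw [hgj] at hvj
          have hxj : x < j := (List.pairwise_cons.mp hl).1 j hj
          simp only [List.mem_singleton] at hu hvj
          omega

-- B's full result is strictly increasing
theorem pvMsB_pairwise (t p : List Char) (n m : Int) :
    ((PySem.List.pyRange 0 n 1).foldl (fun acc i => bLoop t p n m i [m - 1, m, m + 1] acc) []).Pairwise (· < ·) := by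
  have hfun : (fun (acc : List Int) (i : Int) => bLoop t p n m i [m - 1, m, m + 1] acc) =
      (fun acc i => acc ++ bLoop t p n m i [m - 1, m, m + 1] []) := by
    funext acc i
    exact pvBLoop_shape t p n m i _ acc
  rw [hfun, PySem.List.foldl_append_eq_flatMap, List.nil_append]
  exact pvFlat_pairwise _ _ (PySem.List.pairwise_lt_pyRange_one 0 n)
    (fun i => pvBLoop_cases t p n m i _)

-- ===== VERDICT (by name: the statement is the Claim_ definition above) =====
theorem validated_dl_matches_spec : Claim_equal_validated_dl_matches := by
  intro text pattern _
  unfold Spec_validated_dl_matches validated_dl_matches validated_dl_matches_alt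
  dsimp only
  have hfold : ((PySem.List.pyRange 0 ((text.toList.length : Nat) : Int) 1).foldl
        (fun acc i => aLoop text.toList pattern.toList (text.toList.length) (pattern.toList.length) i
          [(pattern.toList.length : Int) - 1, (pattern.toList.length : Int), (pattern.toList.length : Int) + 1] acc) []) =
      ((PySem.List.pyRange 0 ((text.toList.length : Nat) : Int) 1).foldl
        (fun acc i => bLoop text.toList pattern.toList (text.toList.length) (pattern.toList.length) i
          [(pattern.toList.length : Int) - 1, (pattern.toList.length : Int), (pattern.toList.length : Int) + 1] acc) []) := by
    congr 1
    funext acc i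
    refine pvLoop_eq _ _ _ _ _ _ acc ?_
    intro ws hws
    simp only [List.mem_cons, List.not_mem_nil, or_false] at hws
    rcases hws with rfl | rfl | rfl <;> omega
  rw [hfold]
  have hpw := pvMsB_pairwise text.toList pattern.toList (text.toList.length) (pattern.toList.length)
  rw [PySem.Set.ofList_eq_self_of_nodup _ (hpw.imp (fun {a b} h => LT.lt.ne h))]
  apply PySem.List.sorted_eq_of_perm_of_pairwise_lt
  · exact List.Perm.refl _
  · exact hpw
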